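-- pv_equiv track=rewrite | github.com/openkim/kim-tools | kim_tools/aflow_util/core.py | split_parameter_array
-- ===== SOURCE A (Python) =====
-- from typing import Dict, List, Tuple, Union, Optional, Any
--
-- def split_parameter_array(parameter_names: List[str], list_to_split: Optional[List] = None) -> Tuple[List,List]:
--     """
--     Split a list of parameters into cell and internal parameters.
--
--     Args:
--         parameter_names:
--             List of AFLOW parameter names, e.g.
--             `["a", "c/a", "x1", "x2", "y2", "z2"]`
--             Proper AFLOW order is assumed, i.e. cell parameters
--             first, then internal.
--         list_to_split:
--             List to split, must be same length as `parameter_names`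
--             If omitted, `parameter_names` itself will be split
--
--     Returns:
--         `list_to_split` (or `parameter_names` if `list_to_split` is omitted),
--         split into lists corresponding to the split between cell and internal parameters
--
--     Raises:
--         AssertionError:
--             If lengths are incompatible or if `parameter_names` fails an (incomplete)
--             check that it is a sensible list of AFLOW parameters
--     """
--     if list_to_split is None:
--         list_to_split = parameter_names
--
--     assert (len(list_to_split) == len(parameter_names)), \
--         "`list_to_split` must have the same length as `parameter_names`"
--
--     in_internal_part = False
--
--     cell_part = []
--     internal_part = []
--
--     CARTESIAN_AXES = ['x','y','z']
--
--     for name,value in zip(parameter_names,list_to_split):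
--         assert (isinstance(name,str)), "At least one element of `parameter_names` is not a string."
--         if not in_internal_part:
--             if name[0] in CARTESIAN_AXES:
--                 in_internal_part = True
--         else: # means we have already encountered an internal coordinate in a past iteration
--             assert (name[0] in CARTESIAN_AXES), \
--                 "`parameter_names` seems to have an internal parameter followed by a non-internal one"
--
--         if in_internal_part:
--             internal_part.append(value)
--         else:
--             cell_part.append(value)
--
--     return cell_part, internal_part
-- ===== SOURCE B (Python) =====
-- from typing import List, Optional, Tuple
--
--
-- def split_parameter_array(parameter_names: List[str], list_to_split: Optional[List] = None) -> Tuple[List, List]: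
--     if list_to_split is None:
--         list_to_split = parameter_names
--     assert (len(list_to_split) == len(parameter_names)), \
--         "`list_to_split` must have the same length as `parameter_names`"
--     split = len(parameter_names)
--     for i, name in enumerate(parameter_names):
--         assert (isinstance(name, str)), "At least one element of `parameter_names` is not a string."
--         if name[0] in ('x', 'y', 'z'):
--             split = i
--             break
--     for name in parameter_names[split + 1:]:
--         assert (isinstance(name, str)), "At least one element of `parameter_names` is not a string."
--         assert (name[0] in ('x', 'y', 'z')), \
--             "`parameter_names` seems to have an internal parameter followed by a non-internal one"
--     return list_to_split[:split], list_to_split[split:]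
-- ===== Notes on version B (the rewrite author's own statement) =====
-- stated objective: simpler
-- what changed: Instead of a stateful single loop that carries an in_internal_part flag and appends each value to one of two accumulator lists, B finds the index of the first internal parameter, validates the remaining names, and returns two slices of list_to_split.
import Mathlib
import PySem

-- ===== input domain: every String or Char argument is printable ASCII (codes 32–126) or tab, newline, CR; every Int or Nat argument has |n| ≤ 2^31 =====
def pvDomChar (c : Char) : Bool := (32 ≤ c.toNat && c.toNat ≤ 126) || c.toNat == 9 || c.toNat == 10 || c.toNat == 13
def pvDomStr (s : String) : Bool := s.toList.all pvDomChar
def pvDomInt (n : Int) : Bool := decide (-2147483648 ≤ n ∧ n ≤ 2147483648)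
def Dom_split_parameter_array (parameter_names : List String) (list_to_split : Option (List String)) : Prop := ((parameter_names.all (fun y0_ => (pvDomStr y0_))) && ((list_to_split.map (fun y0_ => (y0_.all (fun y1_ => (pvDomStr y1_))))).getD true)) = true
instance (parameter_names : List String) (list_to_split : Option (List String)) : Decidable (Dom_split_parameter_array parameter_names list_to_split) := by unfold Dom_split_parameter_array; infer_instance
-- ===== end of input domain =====

-- B finds the index of the first internal parameter and returns two slices of list_to_split,
-- instead of A's stateful loop appending each value into one of two accumulators (objective: simpler).
-- Pre_ excludes exactly the inputs on which A raises (length mismatch, an empty parameter name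
-- -> IndexError on name[0], or an internal name followed by a non-internal one -> AssertionError).

-- name[0] in ['x','y','z'] on a nonempty name (empty names are excluded by Pre_)
def pvIsAxis (n : String) : Bool :=
  let c := n.toList.headD ' '
  c == 'x' || c == 'y' || c == 'z'

-- ===== PORT A =====
-- A's loop over zip(parameter_names, list_to_split) carrying (in_internal_part, cell_part, internal_part);
-- A's asserts raise only outside Pre_, so the port carries no raising branch.
def pvStepA (st : Bool × List String × List String) (p : String × String) :
    Bool × List String × List String :=
  let inI := if st.1 then st.1 else pvIsAxis p.1
  if inI then (inI, st.2.1, st.2.2 ++ [p.2]) else (inI, st.2.1 ++ [p.2], st.2.2)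

def split_parameter_array (parameter_names : List String) (list_to_split : Option (List String)) : List String × List String :=
  let lts := list_to_split.getD parameter_names
  let st := (parameter_names.zip lts).foldl pvStepA (false, [], [])
  (st.2.1, st.2.2)

-- ===== PORT B =====
-- first loop of Source B: index of the first name starting with a cartesian axis (len if none)
def pvFirstAxisIdx : List String → Nat
  | [] => 0
  | n :: rest => if pvIsAxis n then 0 else 1 + pvFirstAxisIdx rest

-- Source B's second loop only asserts (raises outside Pre_), so it does not appear in the port.
def split_parameter_array_alt (parameter_names : List String) (list_to_split : Option (List String)) : List String × List String :=
  let lts := list_to_split.getD parameter_names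
  let split := pvFirstAxisIdx parameter_names
  (lts.take split, lts.drop split)

-- ===== PRECONDITION & SPEC =====
-- exactly the inputs on which Python A returns: equal lengths, no empty name (name[0] would raise
-- IndexError), and no internal (axis-initial) name followed by a non-internal one (AssertionError)
def Pre_split_parameter_array (parameter_names : List String) (list_to_split : Option (List String)) : Prop :=
  (list_to_split.getD parameter_names).length = parameter_names.length ∧
  (∀ n ∈ parameter_names, n ≠ "") ∧
  (∀ i ∈ List.range parameter_names.length, i + 1 < parameter_names.length →
    pvIsAxis (parameter_names.getD i "") = true → pvIsAxis (parameter_names.getD (i+1) "") = true)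
instance (parameter_names : List String) (list_to_split : Option (List String)) : Decidable (Pre_split_parameter_array parameter_names list_to_split) := by unfold Pre_split_parameter_array; infer_instance

def pvWitness_split_parameter_array : List String × Option (List String) :=
  (["a", "c/a", "x1", "y1"], some ["1", "2", "3", "4"])

def Spec_split_parameter_array (parameter_names : List String) (list_to_split : Option (List String)) (out : List String × List String) : Prop := out = split_parameter_array_alt parameter_names list_to_split
instance (parameter_names : List String) (list_to_split : Option (List String)) (out : List String × List String) : Decidable (Spec_split_parameter_array parameter_names list_to_split out) := by unfold Spec_split_parameter_array; infer_instance

-- ===== CLAIM (what is proved, stated in full; the proofs are below) =====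
def Claim_equal_split_parameter_array : Prop := ∀ (parameter_names : List String) (list_to_split : Option (List String)), Dom_split_parameter_array parameter_names list_to_split → Pre_split_parameter_array parameter_names list_to_split → Spec_split_parameter_array parameter_names list_to_split (split_parameter_array parameter_names list_to_split)

-- ===== LEMMAS AND PROOFS =====

-- once in_internal_part is true, every remaining value goes to internal_part
theorem pvFoldA_true (pairs : List (String × String)) (cell int : List String) :
    pairs.foldl pvStepA (true, cell, int) = (true, cell, int ++ pairs.map Prod.snd) := by
  induction pairs generalizing int with
  | nil => simp
  | cons p rest ih => simp [pvStepA, ih]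

-- A's fold from the false state splits at the first axis-initial name
theorem pvFoldA_false (pn : List String) (lts cell int : List String)
    (hlen : lts.length = pn.length) :
    ((pn.zip lts).foldl pvStepA (false, cell, int)).2 =
      (cell ++ lts.take (pvFirstAxisIdx pn), int ++ lts.drop (pvFirstAxisIdx pn)) := by
  induction pn generalizing lts cell with
  | nil =>
    have h0 : lts = [] := List.length_eq_zero_iff.mp (by simpa using hlen)
    simp [h0]
  | cons n rest ih =>
    cases lts with
    | nil => simp at hlen
    | cons v vs =>
      have hmap : (rest.zip vs).map Prod.snd = vs := by
        apply List.map_snd_zip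
        simp at hlen; omega
      have hlen' : vs.length = rest.length := by simpa using hlen
      by_cases h : pvIsAxis n
      · have hs : pvStepA (false, cell, int) (n, v) = (true, cell, int ++ [v]) := by
          simp [pvStepA, h]
        simp only [List.zip_cons_cons, List.foldl_cons, hs]
        rw [pvFoldA_true]
        simp [pvFirstAxisIdx, h, hmap]
      · have hs : pvStepA (false, cell, int) (n, v) = (false, cell ++ [v], int) := by
          simp [pvStepA, h]
        simp only [List.zip_cons_cons, List.foldl_cons, hs]
        rw [ih vs (cell ++ [v]) hlen']
        simp [pvFirstAxisIdx, h, Nat.add_comm 1 (pvFirstAxisIdx rest)]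

-- ===== VERDICT (by name: the statement is the Claim_ definition above) =====
theorem split_parameter_array_spec : Claim_equal_split_parameter_array := by
  intro pn lts _ hpre
  unfold Spec_split_parameter_array split_parameter_array split_parameter_array_alt
  have h := pvFoldA_false pn (lts.getD pn) [] [] hpre.1
  simp at h
  simp [h]
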